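-- pv_equiv track=rewrite | github.com/xfrnk2/archived-prev-1d1c-repo | codeit_camp/algorithms/3-12_greedy_fee.py | min_fee
-- ===== SOURCE A (Python) =====
-- def min_fee(pages_to_print):
--     pages_to_print.sort()
--     ans = 0
--     prev_value = 0
--     for i in range(len(pages_to_print)):
--         prev_value += pages_to_print[i]
--         ans += prev_value
--     return ans
-- ===== SOURCE B (Python) =====
-- def min_fee(pages_to_print):
--     pages_to_print.sort()
--     n = len(pages_to_print)
--     return sum(pages_to_print[i] * (n - i) for i in range(n))
-- ===== Notes on version B (the rewrite author's own statement) =====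
-- stated objective: alternative
-- what changed: Replaces A's running prefix-sum accumulator with a closed-form positional weight: after sorting, element i is charged (n - i) times, so B sums pages[i]*(n-i) directly with no threaded state.
import Mathlib
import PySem

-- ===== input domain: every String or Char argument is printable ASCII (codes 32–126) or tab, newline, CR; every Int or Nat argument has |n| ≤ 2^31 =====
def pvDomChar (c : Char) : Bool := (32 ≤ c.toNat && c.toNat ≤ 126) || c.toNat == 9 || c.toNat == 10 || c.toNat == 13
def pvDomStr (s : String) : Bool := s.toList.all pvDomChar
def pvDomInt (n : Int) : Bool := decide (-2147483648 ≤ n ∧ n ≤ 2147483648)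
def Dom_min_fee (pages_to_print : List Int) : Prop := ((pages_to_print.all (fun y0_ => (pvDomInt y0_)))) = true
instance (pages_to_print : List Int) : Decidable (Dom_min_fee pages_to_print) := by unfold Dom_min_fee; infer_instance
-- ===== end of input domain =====

-- B replaces A's running prefix-sum accumulator with a closed-form positional weight
-- (element i of the sorted list is charged n - i times); equivalence is about the
-- RETURN value — both Pythons sort the argument in place identically.

-- ===== PORT A =====
-- A: sort, then loop i in range(n) threading (ans, prev_value).
def min_fee (pages_to_print : List Int) : Int :=
  let s := PySem.List.sorted pages_to_print (fun x => x) false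
  let r := (PySem.List.pyRange 0 (s.length : Int) 1).foldl
    (fun (p : Int × Int) i =>
      let prev := p.2 + PySem.List.pyGetD s i 0
      (p.1 + prev, prev)) (0, 0)
  r.1

-- ===== PORT B =====
-- B: sort, then sum pages[i] * (n - i) over i in range(n).
def min_fee_alt (pages_to_print : List Int) : Int :=
  let s := PySem.List.sorted pages_to_print (fun x => x) false
  let n : Int := (s.length : Int)
  ((PySem.List.pyRange 0 n 1).map (fun i => PySem.List.pyGetD s i 0 * (n - i))).sum

-- ===== PRECONDITION & SPEC =====
def Spec_min_fee (pages_to_print : List Int) (out : Int) : Prop := out = min_fee_alt pages_to_print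
instance (pages_to_print : List Int) (out : Int) : Decidable (Spec_min_fee pages_to_print out) := by unfold Spec_min_fee; infer_instance

-- ===== CLAIM (what is proved, stated in full; the proofs are below) =====
def Claim_equal_min_fee : Prop := ∀ (pages_to_print : List Int), Dom_min_fee pages_to_print → Spec_min_fee pages_to_print (min_fee pages_to_print)

-- ===== LEMMAS AND PROOFS =====

-- weighted sum: head of a k-element suffix is charged k times
def pvW : List Int → Int
  | [] => 0
  | x :: t => x * ((t.length : Int) + 1) + pvW t

theorem pvA_fold (s : List Int) : ∀ (a p : Int),
    (s.foldl (fun (q : Int × Int) x => (q.1 + (q.2 + x), q.2 + x)) (a, p)).1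
      = a + (s.length : Int) * p + pvW s := by
  induction s with
  | nil => intro a p; simp [pvW]
  | cons x t ih =>
      intro a p
      simp only [List.foldl_cons, pvW, ih, List.length_cons]
      push_cast
      ring

theorem pvB_sum (s : List Int) :
    ((List.range s.length).map (fun k => s.getD k 0 * ((s.length : Int) - (k : Int)))).sum
      = pvW s := by
  induction s with
  | nil => simp [pvW]
  | cons x t ih =>
      rw [List.length_cons, List.range_succ_eq_map]
      simp only [List.map_cons, List.map_map, List.sum_cons, pvW]
      have h : ((fun k : Nat => (x :: t).getD k 0 * (((t.length + 1 : Nat) : Int) - (k : Int))) ∘ Nat.succ)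
          = fun k : Nat => t.getD k 0 * ((t.length : Int) - (k : Int)) := by
        funext k
        simp only [Function.comp, List.getD_cons_succ]
        push_cast
        ring_nf
      rw [h, ih]
      simp only [List.getD_cons_zero]
      push_cast
      ring

theorem pvB_bridge (s : List Int) :
    ((PySem.List.pyRange 0 (s.length : Int) 1).map
        (fun i => PySem.List.pyGetD s i 0 * ((s.length : Int) - i))).sum = pvW s := by
  rw [PySem.List.pyRange_one]
  simp only [List.map_map]
  have h : ((fun i : Int => PySem.List.pyGetD s i 0 * ((s.length : Int) - i)) ∘
      (fun k : Nat => (0 : Int) + (k : Int)))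
      = fun k : Nat => s.getD k 0 * ((s.length : Int) - (k : Int)) := by
    funext k
    simp [PySem.List.pyGetD_natCast]
  rw [h]
  have hl : (((s.length : Int) - 0).toNat) = s.length := by omega
  rw [hl, pvB_sum]

-- ===== VERDICT (by name: the statement is the Claim_ definition above) =====
theorem min_fee_spec : Claim_equal_min_fee := by
  intro l _
  unfold Spec_min_fee min_fee min_fee_alt
  set s := PySem.List.sorted l (fun x => x) false with hs
  simp only []
  rw [PySem.List.foldl_pyRange_zero_pyGetD' s 0 (fun (q : Int × Int) x => (q.1 + (q.2 + x), q.2 + x)) (0, 0)]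
  rw [pvA_fold, pvB_bridge]
  ring
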